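-- pv_equiv track=rewrite | github.com/dhalpern13/dynamic-fair-division | ranking_experiment.py | bundle_sizes
-- ===== SOURCE A (Python) =====
-- def bundle_sizes(item_list, num_agents):
--     agent_1_size = []
--     agent_n_size = []
--
--     agent_1_cur = 0
--     agent_n_cur = 0
--     for receiving_agent, _ in item_list:
--         if receiving_agent == 0:
--             agent_1_cur += 1
--         elif receiving_agent == num_agents - 1:
--             agent_n_cur += 1
--         agent_1_size.append(agent_1_cur)
--         agent_n_size.append(agent_n_cur)
--     return agent_1_size, agent_n_size
-- ===== SOURCE B (Python) =====
-- def _cumulative_from_positions(n, positions):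
--     # run-length expansion: between consecutive hit positions the cumulative
--     # count is constant, so emit repeated blocks instead of scanning items.
--     out = []
--     prev = -1
--     for k, p in enumerate(positions):
--         out += [k] * (p - prev - 1)
--         out.append(k + 1)
--         prev = p
--     out += [len(positions)] * (n - prev - 1)
--     return out
--
-- def bundle_sizes(item_list, num_agents):
--     n = len(item_list)
--     pos1 = [i for i, (r, _) in enumerate(item_list) if r == 0]
--     posn = [i for i, (r, _) in enumerate(item_list) if r != 0 and r == num_agents - 1]
--     return _cumulative_from_positions(n, pos1), _cumulative_from_positions(n, posn)
-- ===== Notes on version B (the rewrite author's own statement) =====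
-- stated objective: alternative
-- what changed: Instead of one pass maintaining two running counters, B collects the hit positions per agent and then emits each cumulative list as run-length blocks (constant value repeated between consecutive hit positions).
import Mathlib
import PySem

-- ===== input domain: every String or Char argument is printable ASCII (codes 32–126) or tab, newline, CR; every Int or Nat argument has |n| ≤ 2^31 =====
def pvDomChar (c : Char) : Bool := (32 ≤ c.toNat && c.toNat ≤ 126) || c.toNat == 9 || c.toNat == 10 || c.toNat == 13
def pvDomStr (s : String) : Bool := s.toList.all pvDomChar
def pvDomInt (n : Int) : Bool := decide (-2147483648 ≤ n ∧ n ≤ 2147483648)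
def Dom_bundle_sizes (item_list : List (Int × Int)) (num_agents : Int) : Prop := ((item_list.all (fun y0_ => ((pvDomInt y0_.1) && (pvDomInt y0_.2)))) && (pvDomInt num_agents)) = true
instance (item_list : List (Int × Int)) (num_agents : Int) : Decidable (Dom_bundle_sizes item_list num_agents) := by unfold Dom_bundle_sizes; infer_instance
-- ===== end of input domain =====

-- B replaces A's single two-counter pass by collecting hit positions and emitting each cumulative list as run-length blocks; alternative decomposition, same cost.


-- ===== PORT A =====
-- state: (agent_1_size, agent_n_size, agent_1_cur, agent_n_cur)
def bundle_sizes (item_list : List (Int × Int)) (num_agents : Int) : List Int × List Int :=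
  let st := item_list.foldl
    (fun (st : List Int × List Int × Int × Int) item =>
      let c1 := if item.1 == 0 then st.2.2.1 + 1 else st.2.2.1
      let cn := if item.1 == 0 then st.2.2.2
                else if item.1 == num_agents - 1 then st.2.2.2 + 1 else st.2.2.2
      (st.1 ++ [c1], st.2.1 ++ [cn], c1, cn))
    ([], [], 0, 0)
  (st.1, st.2.1)

-- ===== PORT B =====
-- hand port of Python's enumerate(item_list) (indices as Int), exact on all lists
def enumFrom (i : Int) : List (Int × Int) → List (Int × (Int × Int))
  | [] => []
  | x :: xs => (i, x) :: enumFrom (i + 1) xs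

-- _cumulative_from_positions: loop over enumerate(positions) with prev/k;
-- k is the enumerate index, and len(positions) at the end equals final k
def cumBlocks (n : Int) : List Int → Int → Int → List Int
  | [], prev, k => List.replicate (n - prev - 1).toNat k
  | p :: ps, prev, k => List.replicate (p - prev - 1).toNat k ++ (k + 1) :: cumBlocks n ps p (k + 1)

def bundle_sizes_alt (item_list : List (Int × Int)) (num_agents : Int) : List Int × List Int :=
  let n : Int := item_list.length
  let pos1 := ((enumFrom 0 item_list).filter (fun q => q.2.1 == 0)).map (fun q => q.1)
  let posn := ((enumFrom 0 item_list).filter (fun q => q.2.1 != 0 && q.2.1 == num_agents - 1)).map (fun q => q.1)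
  (cumBlocks n pos1 (-1) 0, cumBlocks n posn (-1) 0)

-- ===== PRECONDITION & SPEC =====
def Spec_bundle_sizes (item_list : List (Int × Int)) (num_agents : Int) (out : List Int × List Int) : Prop := out = bundle_sizes_alt item_list num_agents
instance (item_list : List (Int × Int)) (num_agents : Int) (out : List Int × List Int) : Decidable (Spec_bundle_sizes item_list num_agents out) := by unfold Spec_bundle_sizes; infer_instance

-- ===== CLAIM (what is proved, stated in full; the proofs are below) =====
def Claim_equal_bundle_sizes : Prop := ∀ (item_list : List (Int × Int)) (num_agents : Int), Dom_bundle_sizes item_list num_agents → Spec_bundle_sizes item_list num_agents (bundle_sizes item_list num_agents)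

-- ===== LEMMAS AND PROOFS =====

-- clean recursive prefix-sum from a starting value c (common spec for both sides)
def scanFrom (c : Int) : List Int → List Int
  | [] => []
  | x :: xs => (c + x) :: scanFrom (c + x) xs

theorem bundle_sizes_foldl_eq (num_agents : Int) (xs : List (Int × Int)) :
    ∀ (l1 l2 : List Int) (c1 c2 : Int),
    (xs.foldl
      (fun (st : List Int × List Int × Int × Int) item =>
        let a := if item.1 == 0 then st.2.2.1 + 1 else st.2.2.1
        let b := if item.1 == 0 then st.2.2.2
                 else if item.1 == num_agents - 1 then st.2.2.2 + 1 else st.2.2.2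
        (st.1 ++ [a], st.2.1 ++ [b], a, b))
      (l1, l2, c1, c2))
    = (l1 ++ scanFrom c1 (xs.map (fun p => if p.1 == 0 then (1 : Int) else 0)),
       l2 ++ scanFrom c2 (xs.map (fun p => if p.1 == 0 then (0 : Int)
                                           else if p.1 == num_agents - 1 then 1 else 0)),
       c1 + (xs.map (fun p => if p.1 == 0 then (1 : Int) else 0)).sum,
       c2 + (xs.map (fun p => if p.1 == 0 then (0 : Int)
                              else if p.1 == num_agents - 1 then 1 else 0)).sum) := by
  induction xs with
  | nil => intro l1 l2 c1 c2; simp [scanFrom]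
  | cons x xs ih =>
    intro l1 l2 c1 c2
    simp only [List.foldl, List.map, scanFrom, ih]
    by_cases h0 : x.1 == 0 <;> by_cases hn : x.1 == num_agents - 1 <;>
      simp [h0, hn] <;> ring_nf

-- every recorded position is at least the starting offset
theorem mem_pos_ge (P : Int × (Int × Int) → Bool) :
    ∀ (xs : List (Int × Int)) (i p : Int),
      p ∈ ((enumFrom i xs).filter P).map (fun q => q.1) → i ≤ p := by
  intro xs
  induction xs with
  | nil => intro i p h; simp [enumFrom] at h
  | cons x xs ih =>
    intro i p h
    simp only [enumFrom, List.filter] at h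
    by_cases hP : P (i, x)
    · simp [hP] at h
      rcases h with h | h
      · omega
      · have := ih (i + 1) p (by simpa using h); omega
    · simp [hP] at h
      have := ih (i + 1) p (by simpa using h); omega

-- shifting prev forward by one emits exactly one copy of k when all positions (and n) lie beyond prev+1
theorem cumBlocks_shift (n : Int) (pos : List Int) (prev k : Int)
    (hpos : ∀ p ∈ pos, prev + 2 ≤ p) (hn : prev + 2 ≤ n) :
    cumBlocks n pos prev k = k :: cumBlocks n pos (prev + 1) k := by
  cases pos with
  | nil =>
    simp only [cumBlocks]
    have h1 : (n - prev - 1).toNat = (n - (prev + 1) - 1).toNat + 1 := by omega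
    rw [h1, List.replicate_succ]
  | cons p ps =>
    have hp : prev + 2 ≤ p := hpos p (by simp)
    simp only [cumBlocks]
    have h1 : (p - prev - 1).toNat = (p - (prev + 1) - 1).toNat + 1 := by omega
    rw [h1, List.replicate_succ]
    simp

-- main bridge: run-length expansion of the filtered positions equals the prefix scan of indicators
theorem cumBlocks_eq_scanFrom (P : Int × Int → Bool) :
    ∀ (xs : List (Int × Int)) (prev k n : Int), n = prev + 1 + xs.length →
      cumBlocks n (((enumFrom (prev + 1) xs).filter (fun q => P q.2)).map (fun q => q.1)) prev k
        = scanFrom k (xs.map (fun x => if P x then (1 : Int) else 0)) := by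
  intro xs
  induction xs with
  | nil =>
    intro prev k n hn
    simp only [enumFrom, List.filter_nil, List.map_nil, cumBlocks, scanFrom]
    have : (n - prev - 1).toNat = 0 := by simp at hn; omega
    simp [this]
  | cons x xs ih =>
    intro prev k n hn
    simp only [enumFrom, List.filter]
    by_cases hP : P x
    · simp only [hP, if_pos, List.map_cons, cumBlocks, scanFrom]
      have h0 : ((prev + 1) - prev - 1).toNat = 0 := by omega
      have harg : prev + 1 + 1 = prev + 2 := by ring
      rw [h0]
      simp only [List.replicate, List.nil_append]
      have := ih (prev + 1) (k + 1) n (by simp at hn ⊢; omega)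
      rw [harg] at this ⊢
      simp [this]
    · simp only [hP]
      have hmem : ∀ p ∈ ((enumFrom (prev + 1 + 1) xs).filter (fun q => P q.2)).map (fun q => q.1),
          prev + 2 ≤ p := by
        intro p hp
        have := mem_pos_ge (fun q => P q.2) xs (prev + 1 + 1) p hp
        omega
      have hn2 : prev + 2 ≤ n := by simp at hn; omega
      rw [cumBlocks_shift _ _ _ _ hmem hn2]
      have := ih (prev + 1) k n (by simp at hn ⊢; omega)
      have harg : prev + 1 + 1 = prev + 2 := by ring
      rw [harg] at this ⊢
      simp [hP, this, scanFrom]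

-- ===== VERDICT (by name: the statement is the Claim_ definition above) =====
theorem bundle_sizes_spec : Claim_equal_bundle_sizes := by
  intro item_list num_agents _
  unfold Spec_bundle_sizes bundle_sizes bundle_sizes_alt
  simp only [bundle_sizes_foldl_eq, List.nil_append]
  have h1 := cumBlocks_eq_scanFrom (fun x => x.1 == 0) item_list (-1) 0 item_list.length (by simp)
  have h2 := cumBlocks_eq_scanFrom (fun x => x.1 != 0 && x.1 == num_agents - 1) item_list (-1) 0
      item_list.length (by simp)
  have harg : (-1 : Int) + 1 = 0 := by ring
  rw [harg] at h1 h2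
  rw [h1, h2]
  congr 1
  congr 1
  apply List.map_congr_left
  intro x _
  by_cases h0 : x.1 == 0 <;> by_cases hn : x.1 == num_agents - 1 <;> simp [h0, hn] <;> simp_all
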